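-- pv_equiv track=rewrite | github.com/yasufumi-nakata/Pytra | src/toolchain/emit/cpp/types.py | _iter_type_tokens
-- ===== SOURCE A (Python) =====
-- def _is_type_token_start(ch: str) -> bool:
--     return ("A" <= ch <= "Z") or ("a" <= ch <= "z") or ch == "_"
--
-- def _is_type_token_part(ch: str) -> bool:
--     return _is_type_token_start(ch) or ("0" <= ch <= "9")
--
-- def _iter_type_tokens(text: str) -> list[str]:
--     out: list[str] = []
--     i = 0
--     while i < len(text):
--         ch = text[i:i + 1]
--         if not _is_type_token_start(ch):
--             i += 1
--             continue
--         start = i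
--         i += 1
--         while i < len(text) and _is_type_token_part(text[i:i + 1]):
--             i += 1
--         out.append(text[start:i])
--     return out
-- ===== SOURCE B (Python) =====
-- def _iter_type_tokens(text: str) -> list[str]:
--     out: list[str] = []
--     cur: list[str] = []
--     for ch in text:
--         if ("A" <= ch <= "Z") or ("a" <= ch <= "z") or ch == "_" or (cur and "0" <= ch <= "9"):
--             cur.append(ch)
--         else:
--             if cur:
--                 out.append("".join(cur))
--             cur = []
--     if cur:
--         out.append("".join(cur))
--     return out
-- ===== Notes on version B (the rewrite author's own statement) =====
-- stated objective: alternative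
-- what changed: Replaced the index-based scan with nested while loops, per-character slicing and helper-predicate calls by a single for-loop state machine that accumulates the current token character by character (a digit extends only a nonempty accumulator) and flushes it at each non-token character and at the end.
import Mathlib
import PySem

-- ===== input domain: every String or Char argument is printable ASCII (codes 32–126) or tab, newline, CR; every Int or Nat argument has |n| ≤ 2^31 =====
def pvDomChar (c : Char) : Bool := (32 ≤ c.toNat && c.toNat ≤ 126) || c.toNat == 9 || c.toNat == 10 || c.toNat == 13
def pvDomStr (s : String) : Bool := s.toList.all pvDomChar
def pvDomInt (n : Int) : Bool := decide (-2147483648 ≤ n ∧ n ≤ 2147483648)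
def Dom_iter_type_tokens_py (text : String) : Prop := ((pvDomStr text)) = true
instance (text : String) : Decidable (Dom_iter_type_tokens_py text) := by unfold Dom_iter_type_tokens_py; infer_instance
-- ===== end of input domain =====

-- B replaces A's index/while scan by a one-pass accumulator state machine; return values proved equal on every input.

-- ===== PORT A =====
-- _is_type_token_start (A's helper; text[i:i+1] with i < len(text) is the single character text[i])
def pyIsStart (ch : Char) : Bool :=
  ('A' ≤ ch && ch ≤ 'Z') || ('a' ≤ ch && ch ≤ 'z') || ch == '_'

-- _is_type_token_part
def pyIsPart (ch : Char) : Bool :=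
  pyIsStart ch || ('0' ≤ ch && ch ≤ '9')

-- inner 'while i < len(text) and _is_type_token_part(...)': returns the final i.
-- fuel is only a structural-termination guard (the index advances by 1 each step, so cs.length fuel always suffices).
def aInner (cs : List Char) (i : Nat) : Nat → Nat
  | 0 => i
  | fuel + 1 =>
    if i < cs.length then
      if pyIsPart (cs.getD i ' ') then aInner cs (i + 1) fuel else i
    else i

-- outer 'while i < len(text)' loop; text[start:i] with 0 ≤ start ≤ i ≤ len is exactly (cs.drop start).take (i - start)
def aLoop (cs : List Char) (i : Nat) (out : List String) : Nat → List String
  | 0 => out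
  | fuel + 1 =>
    if i < cs.length then
      if !pyIsStart (cs.getD i ' ') then
        aLoop cs (i + 1) out fuel
      else
        let j := aInner cs (i + 1) fuel
        aLoop cs j (out ++ [String.ofList ((cs.drop i).take (j - i))]) fuel
    else out

def iter_type_tokens_py (text : String) : List String :=
  aLoop text.toList 0 [] text.toList.length

-- ===== PORT B =====
-- body of B's for-loop: state = (out, cur)
def bStep (st : List String × List Char) (ch : Char) : List String × List Char :=
  if ('A' ≤ ch && ch ≤ 'Z') || ('a' ≤ ch && ch ≤ 'z') || ch == '_'
      || (!st.2.isEmpty && ('0' ≤ ch && ch ≤ '9')) then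
    (st.1, st.2 ++ [ch])
  else if !st.2.isEmpty then (st.1 ++ [String.ofList st.2], []) else (st.1, [])

def iter_type_tokens_py_alt (text : String) : List String :=
  let st := text.toList.foldl bStep ([], [])
  if !st.2.isEmpty then st.1 ++ [String.ofList st.2] else st.1

-- ===== PRECONDITION & SPEC =====
def Spec_iter_type_tokens_py (text : String) (out : List String) : Prop := out = iter_type_tokens_py_alt text
instance (text : String) (out : List String) : Decidable (Spec_iter_type_tokens_py text out) := by unfold Spec_iter_type_tokens_py; infer_instance

-- ===== CLAIM (what is proved, stated in full; the proofs are below) =====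
def Claim_equal_iter_type_tokens_py : Prop := ∀ (text : String), Dom_iter_type_tokens_py text → Spec_iter_type_tokens_py text (iter_type_tokens_py text)

-- ===== LEMMAS AND PROOFS =====

theorem bStep_eq (st : List String × List Char) (ch : Char) :
    bStep st ch =
      if pyIsStart ch || (!st.2.isEmpty && ('0' ≤ ch && ch ≤ '9')) then (st.1, st.2 ++ [ch])
      else if !st.2.isEmpty then (st.1 ++ [String.ofList st.2], []) else (st.1, []) := by
  simp [bStep, pyIsStart, Bool.or_assoc]

-- aInner computes i plus the length of the isPart-prefix of the rest (given enough fuel)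
theorem aInner_eq (fuel : Nat) (cs : List Char) (i : Nat) (hf : cs.length - i ≤ fuel) :
    aInner cs i fuel = i + ((cs.drop i).takeWhile pyIsPart).length := by
  induction fuel generalizing i with
  | zero =>
    have : cs.drop i = [] := List.drop_eq_nil_of_le (by omega)
    simp [aInner, this]
  | succ fuel ih =>
    unfold aInner
    split
    · rename_i h
      rw [List.drop_eq_getElem_cons h, List.getD_eq_getElem?_getD]
      simp only [List.getElem?_eq_getElem h, Option.getD_some, List.takeWhile_cons]
      split
      · rename_i hp
        simp only [List.length_cons]
        have := ih (i + 1) (by omega); omega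
      · rename_i hp
        simp
    · rename_i h
      rw [List.drop_eq_nil_of_le (by omega)]
      simp

theorem aInner_ge (fuel : Nat) (cs : List Char) (i : Nat) : i ≤ aInner cs i fuel := by
  induction fuel generalizing i with
  | zero => simp [aInner]
  | succ fuel ih =>
    unfold aInner
    split
    · split
      · have := ih (i + 1); omega
      · exact le_refl i
    · exact le_refl i

-- folding bStep over a list of part-characters only extends a nonempty accumulator
theorem fold_parts (l : List Char) (out : List String) (cur : List Char)
    (hc : cur ≠ []) (hl : ∀ c ∈ l, pyIsPart c = true) :
    l.foldl bStep (out, cur) = (out, cur ++ l) := by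
  induction l generalizing cur with
  | nil => simp
  | cons c t ih =>
    have hp : pyIsPart c = true := hl c (List.mem_cons_self ..)
    have hcur : (!cur.isEmpty) = true := by simp [hc]
    rw [List.foldl_cons, bStep_eq]
    have hcond : (pyIsStart c || (!cur.isEmpty && ('0' ≤ c && c ≤ '9'))) = true := by
      simp only [pyIsPart, Bool.or_eq_true] at hp
      rcases hp with hp | hp
      · simp [hp]
      · simp [hcur, hp]
    rw [hcond]
    simp only [if_true]
    rw [ih (cur ++ [c]) (by simp) (fun c hc => hl c (List.mem_cons_of_mem _ hc))]
    simp

-- main invariant: A's outer loop from position i equals B's fold over the remaining characters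
theorem main_inv (fuel : Nat) (cs : List Char) (i : Nat) (out : List String)
    (hf : cs.length - i ≤ fuel) :
    aLoop cs i out fuel =
      (let st := (cs.drop i).foldl bStep (out, []);
       if !st.2.isEmpty then st.1 ++ [String.ofList st.2] else st.1) := by
  induction fuel generalizing i out with
  | zero =>
    have : cs.drop i = [] := List.drop_eq_nil_of_le (by omega)
    simp [aLoop, this]
  | succ fuel ih =>
    unfold aLoop
    split
    · rename_i h
      have hdrop : cs.drop i = cs[i] :: cs.drop (i + 1) := List.drop_eq_getElem_cons h
      rw [List.getD_eq_getElem?_getD]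
      simp only [List.getElem?_eq_getElem h, Option.getD_some]
      by_cases hs : pyIsStart cs[i] = true
      · -- token start
        simp only [hs, Bool.not_true, Bool.false_eq_true, if_false]
        have hj : aInner cs (i + 1) fuel = (i + 1) + ((cs.drop (i + 1)).takeWhile pyIsPart).length :=
          aInner_eq fuel cs (i + 1) (by omega)
        set t := (cs.drop (i + 1)).takeWhile pyIsPart with ht
        set r := (cs.drop (i + 1)).dropWhile pyIsPart with hr
        have htr : t ++ r = cs.drop (i + 1) := List.takeWhile_append_dropWhile
        -- the extracted slice is cs[i] :: t
        have hslice : (cs.drop i).take (aInner cs (i + 1) fuel - i) = cs[i] :: t := by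
          rw [hdrop, hj]
          have : (i + 1) + t.length - i = t.length + 1 := by omega
          rw [this, List.take_succ_cons, ← htr, List.take_left']
          rfl
        rw [hslice]
        -- RHS fold: first step starts the token
        have hstep1 : bStep (out, []) cs[i] = (out, [cs[i]]) := by
          rw [bStep_eq]; simp [hs]
        rw [hdrop, List.foldl_cons, hstep1, ← htr, List.foldl_append]
        rw [fold_parts t out [cs[i]] (by simp) (fun c hc => List.mem_takeWhile_imp hc)]
        simp only [List.singleton_append]
        have hdropj : cs.drop (aInner cs (i + 1) fuel) = r := by
          rw [hj, ← List.drop_drop, ← htr, List.drop_left' rfl]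
        have hge : i + 1 ≤ aInner cs (i + 1) fuel := aInner_ge fuel cs (i + 1)
        rw [ih (aInner cs (i + 1) fuel) (out ++ [String.ofList ((cs[i] :: t))]) (by omega), hdropj]
        -- both sides now fold over r; if r is nonempty its head is not a part char, so both flush identically
        cases hrc : r with
        | nil => simp
        | cons d rest =>
          have hd : pyIsPart d = false := by
            have := List.head_dropWhile_not (p := pyIsPart) (l := cs.drop (i + 1))
            rw [← hr, hrc] at this
            simpa using this (by simp)
          have hd' : pyIsStart d = false := by
            simp only [pyIsPart, Bool.or_eq_false_iff] at hd; exact hd.1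
          have hd'' : ('0' ≤ d && d ≤ '9') = false := by
            simp only [pyIsPart, Bool.or_eq_false_iff] at hd; exact hd.2
          simp only [List.foldl_cons]
          have h1 : bStep (out, cs[i] :: t) d = (out ++ [String.ofList (cs[i] :: t)], []) := by
            rw [bStep_eq]; simp [hd', hd'']
          have h2 : bStep (out ++ [String.ofList (cs[i] :: t)], []) d
              = (out ++ [String.ofList (cs[i] :: t)], []) := by
            rw [bStep_eq]; simp [hd', hd'']
          rw [h1, h2]
      · -- not a token start: both sides skip the character
        simp only [hs, Bool.not_false, if_true]
        rw [ih (i + 1) out (by omega), hdrop, List.foldl_cons]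
        have : bStep (out, []) cs[i] = (out, []) := by
          rw [bStep_eq]; simp [hs]
        rw [this]
    · rename_i h
      rw [List.drop_eq_nil_of_le (by omega)]
      simp

-- ===== VERDICT (by name: the statement is the Claim_ definition above) =====
theorem iter_type_tokens_py_spec : Claim_equal_iter_type_tokens_py := by
  intro text _
  unfold Spec_iter_type_tokens_py iter_type_tokens_py iter_type_tokens_py_alt
  exact main_inv text.toList.length text.toList 0 [] (by omega)
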